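-- pv_equiv track=rewrite | github.com/PNaharro/Dam1 | Uf2_naharro/Recursividad1/Ex9.py | comparaVectores
-- ===== SOURCE A (Python) =====
-- def comparaVectores(v1,v2):
--     resultado = False
--     if len(v1) != len(v2):
--         return resultado
--     if len(v1) == 0 and len(v2) == 0:
--         resultado = True
--         return resultado
--     elif v1[0] != v2[0]:
--         return resultado
--     else:
--         resultado = comparaVectores(v1[1:],v2[1:])
--         return resultado
-- ===== SOURCE B (Python) =====
-- def comparaVectores(v1, v2):
--     if len(v1) != len(v2):
--         return False
--     for x, y in zip(v1, v2):
--         if x != y: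
--             return False
--     return True
-- ===== Notes on version B (the rewrite author's own statement) =====
-- stated objective: simpler
-- what changed: Replaced the recursion with repeated list slicing by a single iterative zip loop with early exit after one length check.
import Mathlib
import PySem

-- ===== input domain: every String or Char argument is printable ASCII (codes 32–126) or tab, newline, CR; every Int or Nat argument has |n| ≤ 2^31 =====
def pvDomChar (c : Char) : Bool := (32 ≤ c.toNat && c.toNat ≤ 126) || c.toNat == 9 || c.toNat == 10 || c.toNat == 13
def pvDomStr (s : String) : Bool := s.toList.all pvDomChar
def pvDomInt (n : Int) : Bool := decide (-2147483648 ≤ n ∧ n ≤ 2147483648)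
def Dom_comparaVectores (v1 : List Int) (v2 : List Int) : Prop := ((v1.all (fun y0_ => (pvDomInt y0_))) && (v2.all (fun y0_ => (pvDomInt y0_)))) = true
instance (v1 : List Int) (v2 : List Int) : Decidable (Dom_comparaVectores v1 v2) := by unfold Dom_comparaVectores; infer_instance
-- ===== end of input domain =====

-- B replaces A's recursion with repeated O(n) slicing by one length check and a single zip loop with early exit (simpler, and avoids the slicing cost).

-- ===== PORT A =====
def comparaVectores (v1 : List Int) (v2 : List Int) : Bool :=
  -- resultado = False
  if v1.length ≠ v2.length then false
  else if v1.length = 0 && v2.length = 0 then true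
  else if PySem.List.pyGet? v1 0 ≠ PySem.List.pyGet? v2 0 then false
  else comparaVectores (PySem.List.slice v1 (some 1) none) (PySem.List.slice v2 (some 1) none)
termination_by v1.length
decreasing_by
  simp only [PySem.List.slice_from_one, List.length_tail]
  rename_i h1 h2 h3
  simp at h1 h2
  cases v1 <;> cases v2 <;> simp_all

-- ===== PORT B =====
-- B's inner loop: for x, y in zip(v1, v2): if x != y: return False; return True
def pvEqLoop : List (Int × Int) → Bool
  | [] => true
  | (x, y) :: rest => if x ≠ y then false else pvEqLoop rest

def comparaVectores_alt (v1 : List Int) (v2 : List Int) : Bool :=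
  if v1.length ≠ v2.length then false
  else pvEqLoop (v1.zip v2)

-- ===== PRECONDITION & SPEC =====
def Spec_comparaVectores (v1 : List Int) (v2 : List Int) (out : Bool) : Prop := out = comparaVectores_alt v1 v2
instance (v1 : List Int) (v2 : List Int) (out : Bool) : Decidable (Spec_comparaVectores v1 v2 out) := by unfold Spec_comparaVectores; infer_instance

-- ===== CLAIM (what is proved, stated in full; the proofs are below) =====
def Claim_equal_comparaVectores : Prop := ∀ (v1 : List Int) (v2 : List Int), Dom_comparaVectores v1 v2 → Spec_comparaVectores v1 v2 (comparaVectores v1 v2)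

-- ===== LEMMAS AND PROOFS =====
theorem comparaVectores_eq (v1 v2 : List Int) : comparaVectores v1 v2 = comparaVectores_alt v1 v2 := by
  induction v1 generalizing v2 with
  | nil =>
    cases v2 <;> simp [comparaVectores.eq_def, comparaVectores_alt, pvEqLoop]
  | cons a t ih =>
    cases v2 with
    | nil => simp [comparaVectores.eq_def, comparaVectores_alt]
    | cons b u =>
      rw [comparaVectores.eq_def]
      by_cases hlen : t.length = u.length
      · by_cases hab : a = b
        · simp [hlen, hab, PySem.List.slice_from_one, ih,
                comparaVectores_alt, pvEqLoop]
        · simp [hlen, hab, comparaVectores_alt, pvEqLoop]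
      · simp [comparaVectores_alt, hlen]

-- ===== VERDICT (by name: the statement is the Claim_ definition above) =====
theorem comparaVectores_spec : Claim_equal_comparaVectores := by
  intro v1 v2 _
  exact comparaVectores_eq v1 v2
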